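-- pv_equiv track=rewrite | github.com/Physik-Institut-UZH/xenopy | xenopy/io/xenodaq.py | _channel_map_to_wfs_to_load
-- ===== SOURCE A (Python) =====
-- from typing import Dict, List, Optional, Tuple
--
-- def _channel_map_to_wfs_to_load(channel_map: Dict) -> Dict[str, List[str]]:
--     """
--     Convert a ChsMap dict to the wfs_to_load format for load_xenodaq_run.
--
--     Entries with null tree or channel are silently skipped.
--     """
--     wfs_to_load: Dict[str, List[str]] = {}
--     for loc in channel_map.values():
--         tree = loc.get('tree')
--         channel = loc.get('channel')
--         if tree is None or channel is None:
--             continue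
--         dig_n = tree.split('_')[1]
--         if dig_n not in wfs_to_load:
--             wfs_to_load[dig_n] = []
--         if channel not in wfs_to_load[dig_n]:
--             wfs_to_load[dig_n].append(channel)
--     return wfs_to_load
-- ===== SOURCE B (Python) =====
-- def _channel_map_to_wfs_to_load(channel_map):
--     # Pass 1: flatten the map to a stream of (digitizer, channel) pairs.
--     pairs = []
--     for loc in channel_map.values():
--         tree = loc.get('tree')
--         channel = loc.get('channel')
--         if tree is not None and channel is not None:
--             pairs.append((tree.split('_')[1], channel))
--     # Pass 2: drop repeated pairs globally, keeping first occurrences;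
--     # Pass 3: group the now-distinct pairs, appending unconditionally.
--     wfs_to_load = {}
--     for dig_n, channel in dict.fromkeys(pairs):
--         wfs_to_load.setdefault(dig_n, []).append(channel)
--     return wfs_to_load
-- ===== Notes on version B (the rewrite author's own statement) =====
-- stated objective: alternative
-- what changed: A builds the result dict in one interleaved loop with a per-entry membership scan of the growing per-digitizer list; B instead flattens the map to a (digitizer, channel) pair stream, removes duplicate pairs globally in one hash-based pass, and then groups the distinct pairs with unconditional appends — no membership test on any output list remains.
import Mathlib
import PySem

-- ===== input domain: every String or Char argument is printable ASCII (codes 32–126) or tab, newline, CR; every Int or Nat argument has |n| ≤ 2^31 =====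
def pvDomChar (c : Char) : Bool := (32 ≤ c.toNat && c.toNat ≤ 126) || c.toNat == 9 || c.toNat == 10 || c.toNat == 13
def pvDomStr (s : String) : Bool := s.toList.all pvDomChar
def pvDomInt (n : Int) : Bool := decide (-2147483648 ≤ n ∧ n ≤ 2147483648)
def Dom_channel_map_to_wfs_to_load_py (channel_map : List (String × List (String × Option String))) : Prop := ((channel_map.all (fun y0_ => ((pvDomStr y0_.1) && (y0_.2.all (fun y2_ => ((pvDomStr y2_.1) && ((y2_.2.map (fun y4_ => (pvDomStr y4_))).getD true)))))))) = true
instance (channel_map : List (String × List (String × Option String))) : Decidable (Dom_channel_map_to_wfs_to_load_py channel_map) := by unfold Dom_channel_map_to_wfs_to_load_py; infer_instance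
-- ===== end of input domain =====

-- B replaces A's interleaved build-and-membership-scan loop by three staged passes:
-- flatten to (digitizer, channel) pairs, dedup the pairs globally, then group by
-- unconditional appends (alternative decomposition, same results).
-- ===== PORT A =====
-- one interleaved loop: ensure key, then append channel if absent (port of A)
def channel_map_to_wfs_to_load_py (channel_map : List (String × List (String × Option String))) : List (String × List String) :=
  (channel_map.foldl (fun (wfs : PySem.Dict String (List String)) e =>
      let loc : PySem.Dict String (Option String) := PySem.Dict.mk e.2
      match (loc.get? "tree").join, (loc.get? "channel").join with
      | some tree, some channel =>
        let dig_n : String := (PySem.List.pyGet? ((PySem.Str.split? tree "_").getD []) 1).getD ""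
        let wfs1 := if wfs.contains dig_n then wfs else wfs.insert dig_n []
        if channel ∈ wfs1.getD dig_n [] then wfs1
        else wfs1.insert dig_n (wfs1.getD dig_n [] ++ [channel])
      | _, _ => wfs) PySem.Dict.empty).items

-- ===== PORT B =====
-- three passes: flatten to (dig, channel) pairs, dedup pairs globally (dict.fromkeys),
-- group distinct pairs with unconditional appends (port of B)
def channel_map_to_wfs_to_load_py_alt (channel_map : List (String × List (String × Option String))) : List (String × List String) :=
  let pairs : List (String × String) := channel_map.foldl (fun acc e =>
      let loc : PySem.Dict String (Option String) := PySem.Dict.mk e.2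
      match ((loc.get? "tree").join, (loc.get? "channel").join) with
      | (some tree, some channel) =>
          acc ++ [((PySem.List.pyGet? ((PySem.Str.split? tree "_").getD []) 1).getD "", channel)]
      | (some _, none) => acc
      | (none, some _) => acc
      | (none, none) => acc) []
  ((PySem.List.dedup pairs).foldl (fun (out : PySem.Dict String (List String)) p =>
      out.modify p.1 [] (· ++ [p.2])) PySem.Dict.empty).items

-- ===== PRECONDITION & SPEC =====
-- Pre_ excludes exactly the inputs where both programs raise IndexError: an entry whose
-- tree and channel are both non-null while the tree splits into fewer than two pieces on
-- '_', so indexing the second piece is out of range.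
def Pre_channel_map_to_wfs_to_load_py (channel_map : List (String × List (String × Option String))) : Prop :=
  (channel_map.all (fun e =>
    !(((PySem.Dict.mk e.2).get? "tree").join).isSome ||
    !(((PySem.Dict.mk e.2).get? "channel").join).isSome ||
    decide (2 ≤ ((PySem.Str.split? ((((PySem.Dict.mk e.2).get? "tree").join).getD "") "_").getD []).length))) = true
instance (channel_map : List (String × List (String × Option String))) : Decidable (Pre_channel_map_to_wfs_to_load_py channel_map) := by unfold Pre_channel_map_to_wfs_to_load_py; infer_instance
def pvWitness_channel_map_to_wfs_to_load_py : (List (String × List (String × Option String))) :=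
  [("pmt0", [("tree", some "t_1"), ("channel", some "w0")]),
   ("pmt1", [("tree", some "t_1"), ("channel", some "w0")]),
   ("pmt2", [("tree", none), ("channel", some "w2")])]
def Spec_channel_map_to_wfs_to_load_py (channel_map : List (String × List (String × Option String))) (out : List (String × List String)) : Prop := out = channel_map_to_wfs_to_load_py_alt channel_map
instance (channel_map : List (String × List (String × Option String))) (out : List (String × List String)) : Decidable (Spec_channel_map_to_wfs_to_load_py channel_map out) := by unfold Spec_channel_map_to_wfs_to_load_py; infer_instance

-- ===== CLAIM (what is proved, stated in full; the proofs are below) =====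
def Claim_equal_channel_map_to_wfs_to_load_py : Prop := ∀ (channel_map : List (String × List (String × Option String))), Dom_channel_map_to_wfs_to_load_py channel_map → Pre_channel_map_to_wfs_to_load_py channel_map → Spec_channel_map_to_wfs_to_load_py channel_map (channel_map_to_wfs_to_load_py channel_map)

-- ===== LEMMAS AND PROOFS =====

-- the (dig, channel) pair an entry of the map contributes, if any
def pvPair (e : String × List (String × Option String)) : List (String × String) :=
  match (((PySem.Dict.mk e.2).get? "tree").join), (((PySem.Dict.mk e.2).get? "channel").join) with
  | some tree, some channel =>
      [((PySem.List.pyGet? ((PySem.Str.split? tree "_").getD []) 1).getD "", channel)]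
  | _, _ => []

def pvPairs (l : List (String × List (String × Option String))) : List (String × String) :=
  l.flatMap pvPair

-- A's per-entry step restricted to a produced pair
def pvStepP (w : PySem.Dict String (List String)) (p : String × String) : PySem.Dict String (List String) :=
  let wfs1 := if w.contains p.1 then w else w.insert p.1 []
  if p.2 ∈ wfs1.getD p.1 [] then wfs1 else wfs1.insert p.1 (wfs1.getD p.1 [] ++ [p.2])

-- B's grouping step: unconditional append
def pvStepQ (w : PySem.Dict String (List String)) (p : String × String) : PySem.Dict String (List String) :=
  w.modify p.1 [] (· ++ [p.2])

-- dedup of a list relative to the pairs already seen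
def pvDedupFrom (S : List (String × String)) : List (String × String) → List (String × String)
  | [] => []
  | p :: P => if p ∈ S then pvDedupFrom S P else p :: pvDedupFrom (S ++ [p]) P

lemma pvA_eq_foldP (l : List (String × List (String × Option String))) (w : PySem.Dict String (List String)) :
    l.foldl (fun wfs e =>
      let loc : PySem.Dict String (Option String) := PySem.Dict.mk e.2
      match (loc.get? "tree").join, (loc.get? "channel").join with
      | some tree, some channel =>
        let dig_n : String := (PySem.List.pyGet? ((PySem.Str.split? tree "_").getD []) 1).getD ""
        let wfs1 := if wfs.contains dig_n then wfs else wfs.insert dig_n []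
        if channel ∈ wfs1.getD dig_n [] then wfs1
        else wfs1.insert dig_n (wfs1.getD dig_n [] ++ [channel])
      | _, _ => wfs) w
    = (pvPairs l).foldl pvStepP w := by
  induction l generalizing w with
  | nil => rfl
  | cons e l ih =>
    simp only [List.foldl_cons, pvPairs, List.flatMap_cons, List.foldl_append]
    rw [ih]
    congr 1
    unfold pvPair
    rcases (((PySem.Dict.mk e.2).get? "tree").join) with _ | t <;>
      rcases (((PySem.Dict.mk e.2).get? "channel").join) with _ | c <;> rfl

lemma pvB_pass1 (l : List (String × List (String × Option String))) (acc : List (String × String)) :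
    l.foldl (fun acc e =>
      let loc : PySem.Dict String (Option String) := PySem.Dict.mk e.2
      match ((loc.get? "tree").join, (loc.get? "channel").join) with
      | (some tree, some channel) =>
          acc ++ [((PySem.List.pyGet? ((PySem.Str.split? tree "_").getD []) 1).getD "", channel)]
      | (some _, none) => acc
      | (none, some _) => acc
      | (none, none) => acc) acc
    = acc ++ pvPairs l := by
  induction l generalizing acc with
  | nil => simp [pvPairs]
  | cons e l ih =>
    have hstep : (let loc : PySem.Dict String (Option String) := PySem.Dict.mk e.2
        match ((loc.get? "tree").join, (loc.get? "channel").join) with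
        | (some tree, some channel) =>
            acc ++ [((PySem.List.pyGet? ((PySem.Str.split? tree "_").getD []) 1).getD "", channel)]
        | (some _, none) => acc
        | (none, some _) => acc
        | (none, none) => acc) = acc ++ pvPair e := by
      unfold pvPair
      cases h1 : (((PySem.Dict.mk e.2).get? "tree").join) <;>
        cases h2 : (((PySem.Dict.mk e.2).get? "channel").join) <;> simp [h1, h2]
    rw [List.foldl_cons, hstep, ih]
    simp [pvPairs]

lemma pvModify_eq_insert (d : PySem.Dict String (List String)) (k : String) (f : List String → List String) :
    d.modify k [] f = d.insert k (f (d.getD k [])) := rfl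

lemma pvStepP_eq (w : PySem.Dict String (List String)) (p : String × String) :
    pvStepP w p = if p.2 ∈ w.getD p.1 [] then w else pvStepQ w p := by
  unfold pvStepP pvStepQ
  rw [pvModify_eq_insert]
  rcases hc : w.contains p.1 with _ | _
  · have hD : w.getD p.1 [] = [] := PySem.Dict.getD_of_not_contains w [] hc
    simp only [Bool.false_eq_true, if_false, PySem.Dict.getD_insert_self,
      List.not_mem_nil, hD, List.nil_append, PySem.Dict.insert_insert_self]
  · simp only [if_true]

lemma pvDedup_update (P S : List (String × String)) :
    PySem.Set.update S P = S ++ pvDedupFrom S P := by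
  induction P generalizing S with
  | nil => simp [PySem.Set.update, pvDedupFrom]
  | cons p P ih =>
    simp only [PySem.Set.update, List.foldl_cons, pvDedupFrom]
    by_cases hp : p ∈ S
    · rw [if_pos hp, PySem.Set.add_of_mem hp]
      exact ih S
    · rw [if_neg hp, PySem.Set.add_of_not_mem hp]
      rw [show List.foldl PySem.Set.add (S ++ [p]) P = PySem.Set.update (S ++ [p]) P from rfl, ih]
      simp

lemma pvDedup_eq (P : List (String × String)) :
    PySem.List.dedup P = pvDedupFrom [] P := by
  rw [PySem.List.dedup_eq_ofList]
  have : PySem.Set.ofList P = PySem.Set.update [] P := rfl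
  rw [this, pvDedup_update]
  simp

lemma pvMain (P : List (String × String)) (w : PySem.Dict String (List String))
    (S : List (String × String))
    (hinv : ∀ p : String × String, p.2 ∈ w.getD p.1 [] ↔ p ∈ S) :
    P.foldl pvStepP w = (pvDedupFrom S P).foldl pvStepQ w := by
  induction P generalizing w S with
  | nil => rfl
  | cons p P ih =>
    simp only [List.foldl_cons, pvDedupFrom, pvStepP_eq]
    by_cases hp : p ∈ S
    · rw [if_pos ((hinv p).mpr hp), if_pos hp]
      exact ih w S hinv
    · rw [if_neg (fun h => hp ((hinv p).mp h)), if_neg hp]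
      simp only [List.foldl_cons]
      refine ih (pvStepQ w p) (S ++ [p]) ?_
      intro q
      unfold pvStepQ
      rw [PySem.Dict.getD_modify]
      by_cases hd : q.1 = p.1
      · rw [if_pos hd, ← hd, List.mem_append, List.mem_singleton,
          List.mem_append, List.mem_singleton, hinv q]
        constructor
        · rintro (h | h)
          · exact Or.inl h
          · exact Or.inr (Prod.ext_iff.mpr ⟨hd, h⟩)
        · rintro (h | h)
          · exact Or.inl h
          · exact Or.inr (by rw [h])
      · rw [if_neg hd, hinv q, List.mem_append, List.mem_singleton]
        constructor
        · exact Or.inl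
        · rintro (h | h)
          · exact h
          · exact absurd (by rw [h]) hd

-- ===== VERDICT (by name: the statement is the Claim_ definition above) =====
theorem channel_map_to_wfs_to_load_py_spec : Claim_equal_channel_map_to_wfs_to_load_py := by
  intro channel_map _ _
  unfold Spec_channel_map_to_wfs_to_load_py
  unfold channel_map_to_wfs_to_load_py channel_map_to_wfs_to_load_py_alt
  rw [pvA_eq_foldP, pvB_pass1, List.nil_append]
  show (List.foldl pvStepP PySem.Dict.empty (pvPairs channel_map)).items
      = (List.foldl pvStepQ PySem.Dict.empty (PySem.List.dedup (pvPairs channel_map))).items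
  rw [pvDedup_eq]
  congr 1
  exact pvMain (pvPairs channel_map) PySem.Dict.empty []
    (fun p => by simp [PySem.Dict.getD_empty])
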